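-- pv_equiv track=rewrite | github.com/Nguyenvangiahuy123/lc79-betvip-api | main.py | momentum_divergence
-- ===== SOURCE A (Python) =====
-- def momentum_divergence(history):
--     if len(history) < 12: return False
--     nums = [1 if c=='T' else 0 for c in history[-12:]]
--     # Động lượng 3 phiên
--     mom3 = [nums[i] - nums[i-3] for i in range(3, len(nums))]
--     # Động lượng 6 phiên
--     mom6 = [nums[i] - nums[i-6] for i in range(6, len(nums))]
--     if len(mom3) >= 2 and len(mom6) >= 2:
--         if (mom3[-1] > 0 and mom6[-1] < 0) or (mom3[-1] < 0 and mom6[-1] > 0):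
--             return True
--     return False
-- ===== SOURCE B (Python) =====
-- def momentum_divergence(history):
--     if len(history) < 12:
--         return False
--     last = 1 if history[-1] == 'T' else 0
--     p3 = 1 if history[-4] == 'T' else 0
--     p6 = 1 if history[-7] == 'T' else 0
--     a = last - p3
--     b = last - p6
--     return (a > 0 and b < 0) or (a < 0 and b > 0)
-- ===== Notes on version B (the rewrite author's own statement) =====
-- stated objective: simpler
-- what changed: B replaces A's construction of the 12-element nums list and the two momentum lists with a direct read of the three cells history[-1], history[-4], history[-7] that alone determine the result, computing the two last momentum deltas arithmetically.
import Mathlib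
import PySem

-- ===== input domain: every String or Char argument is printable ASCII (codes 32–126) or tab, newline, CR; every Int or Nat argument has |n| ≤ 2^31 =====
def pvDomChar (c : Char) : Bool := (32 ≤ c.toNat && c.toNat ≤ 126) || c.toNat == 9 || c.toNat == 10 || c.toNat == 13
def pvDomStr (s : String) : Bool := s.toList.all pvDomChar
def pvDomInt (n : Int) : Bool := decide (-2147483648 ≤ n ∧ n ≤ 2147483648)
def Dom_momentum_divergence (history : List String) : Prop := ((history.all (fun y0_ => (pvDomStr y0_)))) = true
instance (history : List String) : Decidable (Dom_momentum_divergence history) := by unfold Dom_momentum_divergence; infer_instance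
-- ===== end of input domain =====

-- B reads the three cells history[-1], history[-4], history[-7] directly instead of building
-- nums/mom3/mom6 lists; objective: simpler (O(1) work after the length guard).

-- B reads the three cells history[-1], history[-4], history[-7] directly instead of building
-- the nums/mom3/mom6 lists; objective: simpler.

-- ===== PORT A =====
def momentum_divergence (history : List String) : Bool :=
  if history.length < 12 then false
  else
    let nums : List Int :=
      (PySem.List.slice history (some (-12)) none).map (fun c => if c == "T" then (1:Int) else 0)
    let mom3 : List Int :=
      (PySem.List.pyRange 3 (nums.length : Int) 1).map
        (fun i => PySem.List.pyGetD nums i 0 - PySem.List.pyGetD nums (i - 3) 0)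
    let mom6 : List Int :=
      (PySem.List.pyRange 6 (nums.length : Int) 1).map
        (fun i => PySem.List.pyGetD nums i 0 - PySem.List.pyGetD nums (i - 6) 0)
    if 2 ≤ mom3.length ∧ 2 ≤ mom6.length then
      if ((PySem.List.pyGetD mom3 (-1) 0) > 0 && (PySem.List.pyGetD mom6 (-1) 0) < 0) ||
         ((PySem.List.pyGetD mom3 (-1) 0) < 0 && (PySem.List.pyGetD mom6 (-1) 0) > 0) then true
      else false
    else false


-- ===== PORT B =====
def momentum_divergence_alt (history : List String) : Bool :=
  if history.length < 12 then false
  else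
    let last : Int := if (PySem.List.pyGetD history (-1) "") == "T" then 1 else 0
    let p3   : Int := if (PySem.List.pyGetD history (-4) "") == "T" then 1 else 0
    let p6   : Int := if (PySem.List.pyGetD history (-7) "") == "T" then 1 else 0
    let a := last - p3
    let b := last - p6
    (a > 0 && b < 0) || (a < 0 && b > 0)


-- ===== PRECONDITION & SPEC =====
def Spec_momentum_divergence (history : List String) (out : Bool) : Prop := out = momentum_divergence_alt history
instance (history : List String) (out : Bool) : Decidable (Spec_momentum_divergence history out) := by unfold Spec_momentum_divergence; infer_instance

-- ===== CLAIM (what is proved, stated in full; the proofs are below) =====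
def Claim_equal_momentum_divergence : Prop := ∀ (history : List String), Dom_momentum_divergence history → Spec_momentum_divergence history (momentum_divergence history)

-- ===== LEMMAS AND PROOFS =====

theorem pv_length12_eq (t : List String) (h : t.length = 12) :
    ∃ a0 a1 a2 a3 a4 a5 a6 a7 a8 a9 a10 a11,
      t = [a0,a1,a2,a3,a4,a5,a6,a7,a8,a9,a10,a11] := by
  match t, h with
  | [a0,a1,a2,a3,a4,a5,a6,a7,a8,a9,a10,a11], _ =>
    exact ⟨_,_,_,_,_,_,_,_,_,_,_,_, rfl⟩

theorem momentum_divergence_append12 (pre : List String)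
    (a0 a1 a2 a3 a4 a5 a6 a7 a8 a9 a10 a11 : String) :
    momentum_divergence (pre ++ [a0,a1,a2,a3,a4,a5,a6,a7,a8,a9,a10,a11]) =
    momentum_divergence_alt (pre ++ [a0,a1,a2,a3,a4,a5,a6,a7,a8,a9,a10,a11]) := by
  have hlen : (pre ++ [a0,a1,a2,a3,a4,a5,a6,a7,a8,a9,a10,a11]).length = pre.length + 12 := by
    simp
  have hnlt : ¬ (pre ++ [a0,a1,a2,a3,a4,a5,a6,a7,a8,a9,a10,a11]).length < 12 := by
    rw [hlen]; omega
  have hslice : PySem.List.slice (pre ++ [a0,a1,a2,a3,a4,a5,a6,a7,a8,a9,a10,a11]) (some (-12)) none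
      = [a0,a1,a2,a3,a4,a5,a6,a7,a8,a9,a10,a11] := by
    rw [PySem.List.slice_from_neg_ofNat _ 12 (by norm_num), hlen]
    have : pre.length + 12 - 12 = pre.length := by omega
    rw [this, List.drop_left]
  have hrange : PySem.List.pyRange 3 12 1 = [3,4,5,6,7,8,9,10,11] := by decide
  have hrange6 : PySem.List.pyRange 6 12 1 = [6,7,8,9,10,11] := by decide
  have hg : ∀ (k j : Nat) (x : String), 0 < k → k ≤ 12 → j = 12 - k →
      [a0,a1,a2,a3,a4,a5,a6,a7,a8,a9,a10,a11][j]? = some x →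
      PySem.List.pyGetD (pre ++ [a0,a1,a2,a3,a4,a5,a6,a7,a8,a9,a10,a11]) (-(k:Int)) "" = x := by
    intro k j x hk hk12 hj hx
    rw [PySem.List.pyGetD_neg_natCast _ k _ (by omega) (by rw [hlen]; omega)]
    rw [List.getElem_eq_iff]
    rw [List.getElem?_append_right (by rw [hlen]; omega)]
    have : (pre ++ [a0,a1,a2,a3,a4,a5,a6,a7,a8,a9,a10,a11]).length - k - pre.length = j := by
      rw [hlen]; omega
    rw [this, hx]
  have hg1 := hg 1 11 a11 (by omega) (by omega) (by omega) rfl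
  have hg4 := hg 4 8 a8 (by omega) (by omega) (by omega) rfl
  have hg7 := hg 7 5 a5 (by omega) (by omega) (by omega) rfl
  norm_num at hg1 hg4 hg7
  simp only [momentum_divergence, momentum_divergence_alt, hslice, hnlt, ite_false,
    hg1, hg4, hg7, List.map, List.length_cons, List.length_nil]
  norm_num [hrange, hrange6, PySem.List.pyGetD, PySem.List.pyGet?_neg_one]
  by_cases h11 : a11 = "T" <;> by_cases h8 : a8 = "T" <;> by_cases h5 : a5 = "T" <;>
    simp [h11, h8, h5]

-- ===== VERDICT (by name: the statement is the Claim_ definition above) =====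
theorem momentum_divergence_spec : Claim_equal_momentum_divergence := by
  intro history _
  unfold Spec_momentum_divergence
  by_cases h : history.length < 12
  · simp [momentum_divergence, momentum_divergence_alt, h]
  · have hdl : (history.drop (history.length - 12)).length = 12 := by
      simp; omega
    obtain ⟨a0,a1,a2,a3,a4,a5,a6,a7,a8,a9,a10,a11, ht⟩ := pv_length12_eq _ hdl
    have hsplit : history
        = history.take (history.length - 12) ++ [a0,a1,a2,a3,a4,a5,a6,a7,a8,a9,a10,a11] := by
      rw [← ht, List.take_append_drop]
    rw [hsplit, momentum_divergence_append12]
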